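-- pv_equiv track=rewrite | github.com/24shiny/Quantum-transpilation | final/runtime/qco_level_1.py | split_disparate_communities
-- ===== SOURCE A (Python) =====
-- def split_disparate_communities(gate_list):
--     grouped_gates = {}
--     for gate in gate_list:
--         gate_name = gate['name']
--         if gate_name not in grouped_gates:
--             grouped_gates[gate_name] = []
--         grouped_gates[gate_name].append(gate)
--     return list(grouped_gates.values())
-- ===== SOURCE B (Python) =====
-- def split_disparate_communities(gate_list):
--     # Phase 1: distinct gate names in first-appearance order.
--     seen = set()
--     names = []
--     for gate in gate_list:
--         n = gate['name']
--         if n not in seen: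
--             seen.add(n)
--             names.append(n)
--     # Phase 2: one filter pass per distinct name.
--     return [[g for g in gate_list if g['name'] == n] for n in names]
-- ===== Notes on version B (the rewrite author's own statement) =====
-- stated objective: alternative
-- what changed: A builds groups in one accumulating pass over a dict of lists; B first collects the distinct gate names in first-appearance order and then builds each group by a separate filter pass over the input.
import Mathlib
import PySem

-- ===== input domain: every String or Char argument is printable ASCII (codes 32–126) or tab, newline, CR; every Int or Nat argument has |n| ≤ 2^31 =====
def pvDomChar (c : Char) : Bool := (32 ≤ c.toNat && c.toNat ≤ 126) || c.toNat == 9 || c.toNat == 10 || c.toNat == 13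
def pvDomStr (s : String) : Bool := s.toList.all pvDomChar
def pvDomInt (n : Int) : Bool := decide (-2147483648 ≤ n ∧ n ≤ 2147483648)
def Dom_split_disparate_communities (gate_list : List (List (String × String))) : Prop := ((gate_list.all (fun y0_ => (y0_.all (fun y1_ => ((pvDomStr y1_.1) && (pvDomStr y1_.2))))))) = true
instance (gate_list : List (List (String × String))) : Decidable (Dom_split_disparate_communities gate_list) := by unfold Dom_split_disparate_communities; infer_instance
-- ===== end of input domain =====

-- B replaces A's single accumulating dict-of-lists pass by a two-phase distinct-names-then-filter
-- decomposition (alternative structure, same results).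


-- gate['name'] : first-match lookup in the gate's association list (none = Python KeyError)
def pvName (g : List (String × String)) : Option String := (PySem.Dict.mk g).get? "name"

-- ===== PORT A =====
def split_disparate_communities (gate_list : List (List (String × String))) : List (List (List (String × String))) :=
  (gate_list.foldl (fun grouped_gates gate =>
      match pvName gate with
      | none => grouped_gates   -- Python raises KeyError here; excluded by Pre_
      | some gate_name =>
          (if grouped_gates.contains gate_name then grouped_gates
           else grouped_gates.insert gate_name []).modify gate_name [] (· ++ [gate]))
    PySem.Dict.empty).values

-- ===== PORT B =====
def split_disparate_communities_alt (gate_list : List (List (String × String))) : List (List (List (String × String))) :=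
  let p := gate_list.foldl (fun (p : PySem.Set String × List String) gate =>
      match pvName gate with
      | none => p   -- Python raises KeyError here; excluded by Pre_
      | some n => if PySem.Set.contains p.1 n then p else (PySem.Set.add p.1 n, p.2 ++ [n]))
    (PySem.Set.empty, [])
  p.2.map (fun n => gate_list.filter (fun g => pvName g == some n))

-- ===== PRECONDITION & SPEC =====
-- Pre_ excludes exactly the inputs where Python A raises KeyError: a gate without a 'name' key.
def Pre_split_disparate_communities (gate_list : List (List (String × String))) : Prop :=
  ∀ gate ∈ gate_list, ((PySem.Dict.mk gate).get? "name").isSome = true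
instance (gate_list : List (List (String × String))) : Decidable (Pre_split_disparate_communities gate_list) := by unfold Pre_split_disparate_communities; infer_instance

def pvWitness_split_disparate_communities : (List (List (String × String))) :=
  [[("name", "h"), ("q", "0")], [("name", "cx"), ("q", "0 1")], [("name", "h"), ("q", "1")]]

def Spec_split_disparate_communities (gate_list : List (List (String × String))) (out : List (List (List (String × String)))) : Prop := out = split_disparate_communities_alt gate_list
instance (gate_list : List (List (String × String))) (out : List (List (List (String × String)))) : Decidable (Spec_split_disparate_communities gate_list out) := by unfold Spec_split_disparate_communities; infer_instance

-- ===== CLAIM (what is proved, stated in full; the proofs are below) =====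
def Claim_equal_split_disparate_communities : Prop := ∀ (gate_list : List (List (String × String))), Dom_split_disparate_communities gate_list → Pre_split_disparate_communities gate_list → Spec_split_disparate_communities gate_list (split_disparate_communities gate_list)

-- ===== LEMMAS AND PROOFS =====

-- distinct gate names of ys in first-appearance order
def pvNames (ys : List (List (String × String))) : List String :=
  PySem.Set.ofList (ys.filterMap pvName)

-- the group of gates of ys named n
def pvGrp (ys : List (List (String × String))) (n : String) : List (List (String × String)) :=
  ys.filter (fun g => pvName g == some n)

-- the dict A's loop has built after processing ys
def pvD (ys : List (List (String × String))) : PySem.Dict String (List (List (String × String))) :=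
  PySem.Dict.mk ((pvNames ys).map (fun n => (n, pvGrp ys n)))

theorem pvD_keys (ys : List (List (String × String))) : (pvD ys).keys = pvNames ys := by
  have h1 : ((fun x : String × List (List (String × String)) => x.1) ∘ fun n => (n, pvGrp ys n)) = fun n => n := rfl
  simp only [pvD, PySem.Dict.keys, List.map_map, h1, List.map_id']

theorem pvD_keys_nodup (ys : List (List (String × String))) : (pvD ys).keys.Nodup := by
  rw [pvD_keys]; exact PySem.Set.nodup_ofList _

theorem pvD_getD (ys : List (List (String × String))) (n : String) :
    (pvD ys).getD n [] = if n ∈ pvNames ys then pvGrp ys n else [] := by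
  by_cases h : n ∈ pvNames ys
  · rw [if_pos h]
    refine PySem.Dict.getD_of_mem_items _ ?_ (pvD_keys_nodup ys) []
    simp only [pvD]
    exact List.mem_map.2 ⟨n, h, rfl⟩
  · rw [if_neg h]
    refine PySem.Dict.getD_of_not_contains _ _ ?_
    rw [PySem.Dict.contains_eq_decide_mem_keys, pvD_keys]
    simpa using h

theorem pvGrp_nil_of_not_mem (ys : List (List (String × String))) (n : String)
    (h : n ∉ pvNames ys) : pvGrp ys n = [] := by
  rw [pvGrp, List.filter_eq_nil_iff]
  intro g hg hn
  exact h (by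
    rw [pvNames, PySem.Set.mem_ofList, List.mem_filterMap]
    exact ⟨g, hg, by simpa using hn⟩)

theorem pvNames_append_none (ys : List (List (String × String))) (g : List (String × String))
    (h : pvName g = none) : pvNames (ys ++ [g]) = pvNames ys := by
  simp [pvNames, List.filterMap_append, h]

theorem pvNames_append_some (ys : List (List (String × String))) (g : List (String × String))
    (n : String) (h : pvName g = some n) :
    pvNames (ys ++ [g]) = PySem.Set.add (pvNames ys) n := by
  simp only [pvNames, List.filterMap_append, PySem.Set.ofList_eq_foldl, List.foldl_append]
  simp [h]

theorem pvGrp_append_none (ys : List (List (String × String))) (g : List (String × String))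
    (m : String) (h : pvName g = none) : pvGrp (ys ++ [g]) m = pvGrp ys m := by
  simp [pvGrp, List.filter_append, h]

theorem pvGrp_append_some (ys : List (List (String × String))) (g : List (String × String))
    (n m : String) (h : pvName g = some n) :
    pvGrp (ys ++ [g]) m = pvGrp ys m ++ (if m = n then [g] else []) := by
  by_cases hmn : m = n <;> simp [pvGrp, List.filter_append, h, hmn]
  exact fun h' => absurd h'.symm hmn

theorem mem_pvNames_of_contains (ys : List (List (String × String))) (n : String) :
    (pvD ys).contains n = decide (n ∈ pvNames ys) := by
  rw [PySem.Dict.contains_eq_decide_mem_keys, pvD_keys]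

-- one step of A's loop advances pvD by one gate
theorem pvD_step (ys : List (List (String × String))) (g : List (String × String)) :
    (match pvName g with
      | none => pvD ys
      | some gate_name =>
          (if (pvD ys).contains gate_name then pvD ys
           else (pvD ys).insert gate_name []).modify gate_name [] (· ++ [g]))
      = pvD (ys ++ [g]) := by
  cases h : pvName g with
  | none =>
      simp only []
      apply PySem.Dict.ext
      simp only [pvD, pvNames_append_none ys g h]
      exact List.map_congr_left fun k _ => by rw [pvGrp_append_none ys g k h]
  | some n =>
      simp only []
      set base := (if (pvD ys).contains n then pvD ys else (pvD ys).insert n []) with hbase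
      have hbkeys : base.keys = pvNames (ys ++ [g]) := by
        rw [pvNames_append_some ys g n h, PySem.Set.add]
        by_cases hc : n ∈ pvNames ys
        · rw [hbase, if_pos (by rw [mem_pvNames_of_contains]; simpa using hc)]
          rw [pvD_keys]
          simp [PySem.Set.contains, hc]
        · rw [hbase, if_neg (by rw [mem_pvNames_of_contains]; simpa using hc)]
          rw [PySem.Dict.keys_insert_of_not_contains _ _ (by rw [mem_pvNames_of_contains]; simpa using hc)]
          rw [pvD_keys]
          simp [PySem.Set.contains, hc]
      have hbnodup : base.keys.Nodup := by
        rw [hbkeys]; exact PySem.Set.nodup_ofList _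
      have hbgetD : ∀ m, base.getD m [] = if m = n then (pvD ys).getD n [] else (pvD ys).getD m [] := by
        intro m
        by_cases hc : (pvD ys).contains n = true
        · rw [hbase, if_pos hc]; by_cases hmn : m = n <;> simp [hmn]
        · rw [hbase, if_neg hc, PySem.Dict.getD_insert]
          by_cases hmn : m = n <;> simp [hmn]
          rw [PySem.Dict.getD_of_not_contains _ _ (by simpa using hc)]
      have hmod_keys : (base.modify n [] (· ++ [g])).keys = base.keys := by
        rw [PySem.Dict.keys_modify]
        apply PySem.Dict.keys_insert_of_contains
        rw [PySem.Dict.contains_eq_decide_mem_keys, hbkeys,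
            pvNames_append_some ys g n h]
        simp [PySem.Set.mem_add]
      apply PySem.Dict.ext
      rw [PySem.Dict.items_eq_map_keys _ (by rw [hmod_keys]; exact hbnodup) ([]),
          PySem.Dict.items_eq_map_keys _ (pvD_keys_nodup (ys ++ [g])) ([]),
          hmod_keys, hbkeys, pvD_keys]
      refine List.map_congr_left fun m _ => ?_
      refine congrArg _ ?_
      rw [PySem.Dict.getD_modify, pvD_getD (ys ++ [g]) m]
      simp only [hbgetD]
      simp only [pvD_getD]
      rw [pvNames_append_some ys g n h, pvGrp_append_some ys g n m h]
      by_cases hmn : m = n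
      · subst hmn
        by_cases hm : m ∈ pvNames ys
        · simp [hm]
        · simp [hm, pvGrp_nil_of_not_mem ys m hm]
      · by_cases hm : m ∈ pvNames ys
        · simp [hmn, hm, PySem.Set.mem_add]
        · simp [hmn, hm, PySem.Set.mem_add]

-- A's whole loop: folding over xs from pvD ys lands at pvD (ys ++ xs)
theorem pvD_foldl (xs ys : List (List (String × String))) :
    xs.foldl (fun grouped_gates gate =>
      match pvName gate with
      | none => grouped_gates
      | some gate_name =>
          (if grouped_gates.contains gate_name then grouped_gates
           else grouped_gates.insert gate_name []).modify gate_name [] (· ++ [gate]))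
      (pvD ys) = pvD (ys ++ xs) := by
  induction xs generalizing ys with
  | nil => simp
  | cons x xs ih =>
      rw [List.foldl_cons, pvD_step ys x, ih (ys ++ [x])]
      simp

-- B's first phase: both accumulators stay equal and track pvNames
theorem pvB_foldl (xs : List (List (String × String))) (s : List String) :
    xs.foldl (fun (p : PySem.Set String × List String) gate =>
      match pvName gate with
      | none => p
      | some n => if PySem.Set.contains p.1 n then p else (PySem.Set.add p.1 n, p.2 ++ [n]))
      (s, s) = (List.foldl PySem.Set.add s (xs.filterMap pvName),
                List.foldl PySem.Set.add s (xs.filterMap pvName)) := by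
  induction xs generalizing s with
  | nil => simp
  | cons x xs ih =>
      rw [List.foldl_cons]
      cases h : pvName x with
      | none => simp only []; rw [ih s]; simp [h]
      | some n =>
          simp only [h, List.filterMap_cons, List.foldl_cons]
          by_cases hc : PySem.Set.contains s n = true
          · rw [if_pos hc]
            have : PySem.Set.add s n = s := by rw [PySem.Set.add, if_pos hc]
            rw [this, ih s]
          · rw [if_neg hc]
            have : PySem.Set.add s n = s ++ [n] := by
              rw [PySem.Set.add, if_neg hc]
            rw [this, ih (s ++ [n])]

-- ===== VERDICT (by name: the statement is the Claim_ definition above) =====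
theorem split_disparate_communities_spec : Claim_equal_split_disparate_communities := by
  intro gate_list _ _
  unfold Spec_split_disparate_communities split_disparate_communities split_disparate_communities_alt
  have hA : PySem.Dict.empty = pvD [] := rfl
  rw [hA, pvD_foldl gate_list [], List.nil_append]
  have hB := pvB_foldl gate_list []
  rw [show (PySem.Set.empty : PySem.Set String) = ([] : List String) from rfl, hB]
  have hN : List.foldl PySem.Set.add [] (gate_list.filterMap pvName) = pvNames gate_list := by
    rw [pvNames, PySem.Set.ofList_eq_foldl]
  rw [hN]
  simp [pvD, PySem.Dict.values, pvGrp, Function.comp]
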